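-- pv_equiv track=rewrite | github.com/MaxiiGen/Automata-LabActvts-GlenLagata | Automata1.py | dfa1
-- ===== SOURCE A (Python) =====
-- def dfa1(word):
--     s = "a"
--     for c in word:
--         if s == "a":
--             if c == "0":
--                 s = "a"
--             if c == "1":
--                 s = "b"
--         elif s == "b":
--             if c == "0":
--                 s = "b"
--             if c == "1":
--                 s = "a"
--     if s == "b":
--         return True
--     else:
--         return False
-- ===== SOURCE B (Python) =====
-- def dfa1(word):
--     return sum(c == "1" for c in word) % 2 == 1
-- ===== Notes on version B (the rewrite author's own statement) =====
-- stated objective: simpler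
-- what changed: Replaces the explicit two-state transition loop with a single aggregate: count the one-characters and derive the answer from the total's parity.
import Mathlib
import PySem

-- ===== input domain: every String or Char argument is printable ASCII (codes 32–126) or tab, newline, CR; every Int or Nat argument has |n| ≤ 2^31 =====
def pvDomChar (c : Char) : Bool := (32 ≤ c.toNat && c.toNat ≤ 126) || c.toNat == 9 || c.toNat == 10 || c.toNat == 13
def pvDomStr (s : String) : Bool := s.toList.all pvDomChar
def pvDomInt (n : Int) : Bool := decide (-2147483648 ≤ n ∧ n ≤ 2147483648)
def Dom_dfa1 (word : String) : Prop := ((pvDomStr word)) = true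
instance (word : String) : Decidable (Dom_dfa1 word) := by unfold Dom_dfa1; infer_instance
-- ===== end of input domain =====

-- B replaces A's two-state transition loop by summing the '1's and testing parity (objective: simpler).

-- ===== PORT A =====
def dfa1Step (s : String) (c : Char) : String :=
  if s == "a" then
    let s1 := if c == '0' then "a" else s
    if c == '1' then "b" else s1
  else if s == "b" then
    let s1 := if c == '0' then "b" else s
    if c == '1' then "a" else s1
  else s

def dfa1 (word : String) : Bool :=
  let s := word.toList.foldl dfa1Step "a"
  if s == "b" then true else false

-- ===== PORT B =====
def dfa1_alt (word : String) : Bool :=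
  PySem.Int.mod (word.toList.foldl (fun acc c => if c == '1' then acc + 1 else acc) 0) 2 == 1

-- ===== PRECONDITION & SPEC =====
def Spec_dfa1 (word : String) (out : Bool) : Prop := out = dfa1_alt word
instance (word : String) (out : Bool) : Decidable (Spec_dfa1 word out) := by unfold Spec_dfa1; infer_instance

-- ===== CLAIM (what is proved, stated in full; the proofs are below) =====
def Claim_equal_dfa1 : Prop := ∀ (word : String), Dom_dfa1 word → Spec_dfa1 word (dfa1 word)

-- ===== LEMMAS AND PROOFS =====
theorem dfa1_foldl_parity (cs : List Char) :
    cs.foldl dfa1Step "a" = (if cs.count '1' % 2 = 0 then "a" else "b") ∧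
    cs.foldl dfa1Step "b" = (if cs.count '1' % 2 = 0 then "b" else "a") := by
  induction cs with
  | nil => simp
  | cons c cs ih =>
    obtain ⟨iha, ihb⟩ := ih
    by_cases h1 : c = '1'
    · subst h1
      simp [List.foldl_cons, dfa1Step, iha, ihb]
      constructor <;> (rw [Nat.add_mod]; rcases Nat.mod_two_eq_zero_or_one (cs.count '1') with h | h <;> simp [h])
    · have hc : cs.count '1' = (c :: cs).count '1' := by simp [h1]
      by_cases h0 : c = '0' <;>
        simp [List.foldl_cons, dfa1Step, h0, h1, iha, ihb, ← hc]

-- ===== VERDICT (by name: the statement is the Claim_ definition above) =====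
theorem dfa1_spec : Claim_equal_dfa1 := by
  intro word _
  unfold Spec_dfa1 dfa1 dfa1_alt
  rw [PySem.List.foldl_beq_add_one]
  rw [(dfa1_foldl_parity word.toList).1]
  rcases Nat.mod_two_eq_zero_or_one (word.toList.count '1') with h | h
  · have : ((word.toList.count '1' : Int)) % 2 = 0 := by omega
    simp [h, this]
  · have : ((word.toList.count '1' : Int)) % 2 = 1 := by omega
    simp [h, this]
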